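-- pv_equiv track=rewrite | github.com/suyash1798/DSA | Math/Count-Commas-in-Range-II.py | countCommas
-- ===== SOURCE A (Python) =====
-- def countCommas(n: int) -> int:
--     l = 1000
--     u = 1000000
--     c = 0
--     cm = 1
--
--     while n >= l:
--         c += ((min(u - 1, n) - l) + 1) * cm
--         cm += 1
--         l = u
--         u = u * 1000
--
--     return c
-- ===== SOURCE B (Python) =====
-- def countCommas(n: int) -> int:
--     # Threshold decomposition: each x in [1, n] contributes one comma per power
--     # 1000**k (k >= 1) with 1000**k <= x, so total = sum over thresholds t of (n - t + 1).
--     c = 0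
--     t = 1000
--     while t <= n:
--         c += n - t + 1
--         t *= 1000
--     return c
-- ===== Notes on version B (the rewrite author's own statement) =====
-- stated objective: simpler
-- what changed: Replaces A's per-band summation (tracking band bounds l/u and a comma-count multiplier cm, adding band_width*cm per band) with a per-threshold partial-sum decomposition: a single variable t = 1000^k and accumulator adding (n - t + 1) per threshold, dropping the l/u/cm bookkeeping.
import Mathlib
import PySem

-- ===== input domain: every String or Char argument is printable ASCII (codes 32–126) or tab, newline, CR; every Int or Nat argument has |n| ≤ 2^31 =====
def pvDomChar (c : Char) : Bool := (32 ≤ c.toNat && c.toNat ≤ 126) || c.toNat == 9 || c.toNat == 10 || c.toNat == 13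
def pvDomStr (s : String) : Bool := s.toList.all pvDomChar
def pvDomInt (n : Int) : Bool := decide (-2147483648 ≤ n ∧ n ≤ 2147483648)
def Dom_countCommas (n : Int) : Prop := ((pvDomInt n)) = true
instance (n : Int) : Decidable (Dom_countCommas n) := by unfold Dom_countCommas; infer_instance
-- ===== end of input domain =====

-- B replaces A's per-band (width × comma-count) summation with a per-threshold
-- partial-sum decomposition (one term n - t + 1 per power t = 1000^k ≤ n): simpler state.

-- ===== PORT A =====
-- A's while loop; the extra `l < u` conjunct is a totality guard only (on every
-- reachable state u = 1000 * l > l, so it never changes the computed value).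
def countCommasLoop (n l u c cm : Int) : Int :=
  if l ≤ n ∧ l < u then
    countCommasLoop n u (u * 1000) (c + ((min (u - 1) n - l) + 1) * cm) (cm + 1)
  else c
termination_by (n + 1 - l).toNat
decreasing_by omega

def countCommas (n : Int) : Int :=
  countCommasLoop n 1000 1000000 0 1

-- ===== PORT B =====
-- B's while loop; the extra `0 < t` conjunct is a totality guard only (t starts
-- at 1000 and is only multiplied by 1000, so it never changes the computed value).
def countCommasAltLoop (n c t : Int) : Int :=
  if 0 < t ∧ t ≤ n then
    countCommasAltLoop n (c + (n - t + 1)) (t * 1000)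
  else c
termination_by (n + 1 - t).toNat
decreasing_by omega

def countCommas_alt (n : Int) : Int :=
  countCommasAltLoop n 0 1000

-- ===== PRECONDITION & SPEC =====
def Spec_countCommas (n : Int) (out : Int) : Prop := out = countCommas_alt n
instance (n : Int) (out : Int) : Decidable (Spec_countCommas n out) := by unfold Spec_countCommas; infer_instance

-- ===== CLAIM (what is proved, stated in full; the proofs are below) =====
def Claim_equal_countCommas : Prop := ∀ (n : Int), Dom_countCommas n → Spec_countCommas n (countCommas n)

-- ===== LEMMAS AND PROOFS =====
-- On the domain |n| ≤ 2^31 < 1000^4, both loops run at most three iterations;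
-- we unfold both loops fully in each of the four interval cases.

-- ===== VERDICT (by name: the statement is the Claim_ definition above) =====
theorem countCommas_spec : Claim_equal_countCommas := by
  intro n hdom
  have hn : n ≤ 2147483648 := by
    simp only [Dom_countCommas, pvDomInt, decide_eq_true_eq] at hdom
    exact hdom.2
  unfold Spec_countCommas countCommas countCommas_alt
  by_cases h1 : 1000 ≤ n
  · by_cases h2 : 1000000 ≤ n
    · by_cases h3 : 1000000000 ≤ n
      · rw [countCommasLoop, if_pos (by omega), countCommasLoop, if_pos (by omega),
            countCommasLoop, if_pos (by omega), countCommasLoop, if_neg (by omega),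
            countCommasAltLoop, if_pos (by omega), countCommasAltLoop, if_pos (by omega),
            countCommasAltLoop, if_pos (by omega), countCommasAltLoop, if_neg (by omega)]
        omega
      · rw [countCommasLoop, if_pos (by omega), countCommasLoop, if_pos (by omega),
            countCommasLoop, if_neg (by omega),
            countCommasAltLoop, if_pos (by omega), countCommasAltLoop, if_pos (by omega),
            countCommasAltLoop, if_neg (by omega)]
        omega
    · rw [countCommasLoop, if_pos (by omega), countCommasLoop, if_neg (by omega),
          countCommasAltLoop, if_pos (by omega), countCommasAltLoop, if_neg (by omega)]
      omega
  · rw [countCommasLoop, if_neg (by omega), countCommasAltLoop, if_neg (by omega)]
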